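-- pv_equiv track=rewrite | github.com/neumannjan/nn-structural-graph-vectorizer-compiler | lib/vectorize/pipeline/optimize_single_use_gathers.py | iter_lookahead
-- ===== SOURCE A (Python) =====
-- from typing import Iterable, Iterator, Literal, TypeVar
--
-- _T = TypeVar("_T")
--
-- def iter_lookahead(it: Iterable[_T]) -> Iterable[tuple[_T, _T | None]]:
--     if not isinstance(it, Iterator):
--         it = iter(it)
--
--     try:
--         v = next(it)
--     except StopIteration:
--         return
--
--     try:
--         while True:
--             v_next = next(it)
--             yield v, v_next
--             v = v_next
--     except StopIteration:
--         yield v, None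
-- ===== SOURCE B (Python) =====
-- from itertools import tee, chain
--
-- def iter_lookahead(it):
--     a, b = tee(it)
--     next(b, None)
--     return zip(a, chain(b, [None]))
-- ===== Notes on version B (the rewrite author's own statement) =====
-- stated objective: idiomatic
-- what changed: Replaces the hand-written generator with try/except StopIteration handling by a tee/zip/chain pipeline that pairs each element with its successor and the last with None.
import Mathlib
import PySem

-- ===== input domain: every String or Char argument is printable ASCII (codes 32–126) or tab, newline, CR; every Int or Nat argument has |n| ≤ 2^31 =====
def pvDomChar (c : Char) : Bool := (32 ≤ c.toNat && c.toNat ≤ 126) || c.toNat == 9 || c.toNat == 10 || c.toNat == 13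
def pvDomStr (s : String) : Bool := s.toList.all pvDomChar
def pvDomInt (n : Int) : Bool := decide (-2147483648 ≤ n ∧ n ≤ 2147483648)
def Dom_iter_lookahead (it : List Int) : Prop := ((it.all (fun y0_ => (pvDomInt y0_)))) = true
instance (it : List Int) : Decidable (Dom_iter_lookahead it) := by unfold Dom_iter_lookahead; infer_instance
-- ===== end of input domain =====

-- B replaces the hand-written lookahead generator (try/except around next()) by an
-- idiomatic tee/zip/chain pipeline; same O(n) cost, return value proved equal.

-- ===== PORT A =====
-- helper: the generator's while-loop, carrying the current value v
def iterLookLoop (v : Int) : List Int → List (Int × Option Int)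
  | [] => [(v, none)]                       -- StopIteration: yield (v, None)
  | x :: xs => (v, some x) :: iterLookLoop x xs   -- yield (v, v_next); v = v_next

def iter_lookahead (it : List Int) : List (Int × Option Int) :=
  match it with
  | [] => []                                -- first next() raises: return
  | v :: rest => iterLookLoop v rest

-- ===== PORT B =====
-- B: zip(a, chain(b, [None])) with b = it advanced by one
def iter_lookahead_alt (it : List Int) : List (Int × Option Int) :=
  it.zip ((it.drop 1).map some ++ [none])

-- ===== PRECONDITION & SPEC =====
def Spec_iter_lookahead (it : List Int) (out : List (Int × Option Int)) : Prop := out = iter_lookahead_alt it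
instance (it : List Int) (out : List (Int × Option Int)) : Decidable (Spec_iter_lookahead it out) := by unfold Spec_iter_lookahead; infer_instance

-- ===== CLAIM (what is proved, stated in full; the proofs are below) =====
def Claim_equal_iter_lookahead : Prop := ∀ (it : List Int), Dom_iter_lookahead it → Spec_iter_lookahead it (iter_lookahead it)

-- ===== LEMMAS AND PROOFS =====

-- ===== VERDICT (by name: the statement is the Claim_ definition above) =====
theorem loop_eq_zip (xs : List Int) : ∀ v : Int,
    iterLookLoop v xs = (v :: xs).zip (xs.map some ++ [none]) := by
  induction xs with
  | nil => intro v; rfl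
  | cons x xs ih => intro v; simp [iterLookLoop, ih x, List.zip]

theorem iter_lookahead_spec : Claim_equal_iter_lookahead := by
  intro it _
  unfold Spec_iter_lookahead iter_lookahead iter_lookahead_alt
  cases it with
  | nil => rfl
  | cons v rest => simpa using loop_eq_zip rest v
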